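-- pv_equiv track=rewrite | github.com/d1p/switchboard | src/switchboard/services/systemd.py | _parse_show_output
-- ===== SOURCE A (Python) =====
-- def _parse_show_output(text: str) -> dict[str, dict[str, str]]:
--     """
--     Parse the output of `systemctl show unit1 unit2 ... --property=Id,...`.
--
--     systemctl separates each unit's block with a blank line.
--     We use the `Id=` field to key the results.
--     """
--     result: dict[str, dict[str, str]] = {}
--     current: dict[str, str] = {}
--
--     for line in text.splitlines():
--         if line.strip() == "":
--             # End of a unit block
--             unit_id = current.get("Id", "")
--             if unit_id:
--                 result[unit_id] = current
--             current = {}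
--         elif "=" in line:
--             k, _, v = line.partition("=")
--             current[k.strip()] = v.strip()
--
--     # Flush the final block (no trailing blank line)
--     unit_id = current.get("Id", "")
--     if unit_id:
--         result[unit_id] = current
--
--     return result
-- ===== SOURCE B (Python) =====
-- def _parse_show_output(text: str) -> dict[str, dict[str, str]]:
--     """Two-phase: split the text into blocks of non-blank lines first,
--     then build each block's dict with a comprehension and key by Id."""
--     blocks: list[list[str]] = []
--     cur: list[str] = []
--     for ln in text.splitlines():
--         if ln.strip() == "":
--             if cur:
--                 blocks.append(cur)
--                 cur = []
--         else:
--             cur.append(ln)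
--     if cur:
--         blocks.append(cur)
--
--     result: dict[str, dict[str, str]] = {}
--     for block_lines in blocks:
--         block = {
--             k.strip(): v.strip()
--             for k, _, v in (ln.partition("=") for ln in block_lines if "=" in ln)
--         }
--         if block.get("Id"):
--             result[block["Id"]] = block
--     return result
-- ===== Notes on version B (the rewrite author's own statement) =====
-- stated objective: alternative
-- what changed: B replaces A's single pass with mutable current/flush state by a two-phase decomposition: first split the lines into blocks of consecutive non-blank lines, then build each block's dict with a comprehension over partitioned key/value lines and key the result by Id.
import Mathlib
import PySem

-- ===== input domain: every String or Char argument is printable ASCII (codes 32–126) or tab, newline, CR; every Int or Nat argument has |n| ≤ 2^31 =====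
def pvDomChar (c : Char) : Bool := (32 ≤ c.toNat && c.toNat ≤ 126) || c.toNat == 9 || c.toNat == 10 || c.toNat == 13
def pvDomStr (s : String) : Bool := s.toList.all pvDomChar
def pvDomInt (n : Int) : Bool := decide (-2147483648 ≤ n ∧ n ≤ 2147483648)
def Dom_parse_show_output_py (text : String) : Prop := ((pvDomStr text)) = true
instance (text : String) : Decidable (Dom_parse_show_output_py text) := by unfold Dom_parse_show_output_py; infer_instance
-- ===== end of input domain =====

-- B re-implements A by a two-phase decomposition (split into non-blank blocks, then parse each block); same results, same cost.

-- ===== PORT A =====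
-- line.partition("="): (part before the first '=', part after); A only uses it when '=' is in the line.
def pvPartEq : List Char → List Char × List Char
  | [] => ([], [])
  | c :: cs => if c = '=' then ([], cs) else
      let p := pvPartEq cs; (c :: p.1, p.2)

-- unit_id = current.get("Id", ""); if unit_id: result[unit_id] = current
def pvFlushA (r : PySem.Dict String (PySem.Dict String String)) (c : PySem.Dict String String) :
    PySem.Dict String (PySem.Dict String String) :=
  let uid := c.getD "Id" ""
  if uid = "" then r else r.insert uid c

def pvStepA (st : PySem.Dict String (PySem.Dict String String) × PySem.Dict String String)
    (line : String) : PySem.Dict String (PySem.Dict String String) × PySem.Dict String String :=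
  if PySem.Str.strip line = "" then
    (pvFlushA st.1 st.2, PySem.Dict.empty)
  else if PySem.Str.isIn "=" line then
    let p := pvPartEq line.toList
    (st.1, st.2.insert (PySem.Str.strip (String.ofList p.1)) (PySem.Str.strip (String.ofList p.2)))
  else st

def parse_show_output_py (text : String) : List (String × List (String × String)) :=
  let st := (PySem.Str.splitlines text).foldl pvStepA (PySem.Dict.empty, PySem.Dict.empty)
  ((pvFlushA st.1 st.2).items).map (fun p => (p.1, p.2.items))

-- ===== PORT B =====
-- phase 1: the maximal runs of consecutive non-blank lines
def pvBlocksB (cur : List String) : List String → List (List String)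
  | [] => if cur = [] then [] else [cur]
  | l :: ls =>
      if PySem.Str.strip l = "" then
        if cur = [] then pvBlocksB [] ls else cur :: pvBlocksB [] ls
      else pvBlocksB (cur ++ [l]) ls

-- phase 2: the comprehension {k.strip(): v.strip() for ...}
def pvBlockDict (ls : List String) : PySem.Dict String String :=
  ls.foldl (fun d line =>
    if PySem.Str.isIn "=" line then
      let p := pvPartEq line.toList
      d.insert (PySem.Str.strip (String.ofList p.1)) (PySem.Str.strip (String.ofList p.2))
    else d) PySem.Dict.empty

-- if block.get("Id"): result[block["Id"]] = block
def pvStepB (r : PySem.Dict String (PySem.Dict String String)) (b : List String) :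
    PySem.Dict String (PySem.Dict String String) :=
  let d := pvBlockDict b
  match d.get? "Id" with
  | some uid => if uid = "" then r else r.insert uid d
  | none => r

def parse_show_output_py_alt (text : String) : List (String × List (String × String)) :=
  let result := (pvBlocksB [] (PySem.Str.splitlines text)).foldl pvStepB PySem.Dict.empty
  result.items.map (fun p => (p.1, p.2.items))

-- ===== PRECONDITION & SPEC =====
def Spec_parse_show_output_py (text : String) (out : List (String × List (String × String))) : Prop := out = parse_show_output_py_alt text
instance (text : String) (out : List (String × List (String × String))) : Decidable (Spec_parse_show_output_py text out) := by unfold Spec_parse_show_output_py; infer_instance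

-- ===== CLAIM (what is proved, stated in full; the proofs are below) =====
def Claim_equal_parse_show_output_py : Prop := ∀ (text : String), Dom_parse_show_output_py text → Spec_parse_show_output_py text (parse_show_output_py text)

-- ===== LEMMAS AND PROOFS =====

-- B's per-block step is A's flush applied to the block's parsed dict
theorem pvStepB_eq_flush (r : PySem.Dict String (PySem.Dict String String)) (b : List String) :
    pvStepB r b = pvFlushA r (pvBlockDict b) := by
  cases h : (pvBlockDict b).get? "Id" with
  | none =>
      simp [pvStepB, pvFlushA, h, PySem.Dict.getD_eq_get?_getD]
  | some uid =>
      simp only [pvStepB, pvFlushA, h, PySem.Dict.getD_eq_get?_getD, Option.getD_some]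

-- appending one non-separator line to a block extends its dict by one loop step
theorem pvBlockDict_append (cur : List String) (l : String) :
    pvBlockDict (cur ++ [l]) =
      (if PySem.Str.isIn "=" l then
        let p := pvPartEq l.toList
        (pvBlockDict cur).insert (PySem.Str.strip (String.ofList p.1)) (PySem.Str.strip (String.ofList p.2))
      else pvBlockDict cur) := by
  simp [pvBlockDict, List.foldl_append]

-- main loop invariant: A's fold-then-flush equals B's fold over the remaining blocks
theorem pvLoopEq (ls : List String) (cur : List String)
    (r : PySem.Dict String (PySem.Dict String String)) :
    pvFlushA (ls.foldl pvStepA (r, pvBlockDict cur)).1 (ls.foldl pvStepA (r, pvBlockDict cur)).2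
      = (pvBlocksB cur ls).foldl pvStepB r := by
  induction ls generalizing cur r with
  | nil =>
      by_cases hc : cur = []
      · subst hc
        simp [pvBlocksB, pvBlockDict, pvFlushA]
      · simp [pvBlocksB, hc, pvStepB_eq_flush]
  | cons l ls ih =>
      by_cases hb : PySem.Str.strip l = ""
      · have hstep : pvStepA (r, pvBlockDict cur) l = (pvFlushA r (pvBlockDict cur), PySem.Dict.empty) := by
          simp [pvStepA, hb]
        have hempty : (PySem.Dict.empty : PySem.Dict String String) = pvBlockDict [] := rfl
        by_cases hc : cur = []
        · subst hc
          have hr : pvFlushA r (pvBlockDict []) = r := by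
            simp [pvFlushA, pvBlockDict]
          simp only [List.foldl_cons, hstep, hr, hempty, pvBlocksB, if_pos hb]
          exact ih [] r
        · simp only [List.foldl_cons, hstep, hempty, pvBlocksB, if_pos hb, if_neg hc, List.foldl_cons,
            pvStepB_eq_flush]
          exact ih [] _
      · have hstep : pvStepA (r, pvBlockDict cur) l = (r, pvBlockDict (cur ++ [l])) := by
          rw [pvBlockDict_append]
          simp only [pvStepA]
          rw [if_neg hb]
          by_cases he : PySem.Str.isIn "=" l = true
          · rw [if_pos he, if_pos he]
          · rw [if_neg he, if_neg he]
        simp only [List.foldl_cons, hstep, pvBlocksB, if_neg hb]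
        exact ih (cur ++ [l]) r

-- ===== VERDICT (by name: the statement is the Claim_ definition above) =====
theorem parse_show_output_py_spec : Claim_equal_parse_show_output_py := by
  intro text _
  show parse_show_output_py text = parse_show_output_py_alt text
  unfold parse_show_output_py parse_show_output_py_alt
  have h := pvLoopEq (PySem.Str.splitlines text) [] PySem.Dict.empty
  have hempty : pvBlockDict [] = (PySem.Dict.empty : PySem.Dict String String) := rfl
  rw [hempty] at h
  simp only [h]
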